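-- pv_equiv track=rewrite | github.com/BakeryForHackathon/Annotopia | backend/get_QWK.py | group_by_group_id
-- ===== SOURCE A (Python) =====
-- from collections import defaultdict
--
-- def group_by_group_id(client_test_data):
--     grouped = defaultdict(list)
--     for test_id, question_detail_id, group_id in client_test_data:
--         grouped[group_id].append((test_id, question_detail_id))
--
--     result = {}
--     for group_id, items in grouped.items():
--         # test_id でソート
--         items.sort(key=lambda x: x[0])
--         # question_detail_id のリストだけ抽出
--         question_detail_ids = [qd_id for _, qd_id in items]
--         result[group_id] = question_detail_ids
--
--     return result
-- ===== SOURCE B (Python) =====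
-- def group_by_group_id(client_test_data):
--     # keys in first-seen order, then one stable global sort by test_id and a single appending pass
--     result = {group_id: [] for _, _, group_id in client_test_data}
--     for _, question_detail_id, group_id in sorted(client_test_data, key=lambda x: x[0]):
--         result[group_id].append(question_detail_id)
--     return result
-- ===== Notes on version B (the rewrite author's own statement) =====
-- stated objective: simpler
-- what changed: Instead of grouping (test_id, qd_id) pairs per group and sorting each group's list separately, B pre-creates the keys in first-seen order, does ONE stable global sort of the whole input by test_id, and fills every group in a single appending pass (stability makes each group's list identical to A's).
import Mathlib
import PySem

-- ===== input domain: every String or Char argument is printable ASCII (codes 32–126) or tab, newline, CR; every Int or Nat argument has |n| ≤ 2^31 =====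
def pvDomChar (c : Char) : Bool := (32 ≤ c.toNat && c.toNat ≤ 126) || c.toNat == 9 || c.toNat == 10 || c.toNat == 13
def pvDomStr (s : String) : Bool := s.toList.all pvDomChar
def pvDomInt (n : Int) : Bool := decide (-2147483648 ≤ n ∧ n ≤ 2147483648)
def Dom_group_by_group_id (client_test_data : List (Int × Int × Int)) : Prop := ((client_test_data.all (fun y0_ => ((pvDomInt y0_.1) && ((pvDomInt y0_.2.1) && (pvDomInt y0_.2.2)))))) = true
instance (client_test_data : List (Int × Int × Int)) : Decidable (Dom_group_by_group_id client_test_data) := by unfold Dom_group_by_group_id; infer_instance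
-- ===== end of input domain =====

-- B replaces A's per-group sorting by one stable global sort by test_id followed by a single
-- appending pass over the sorted rows (objective: simpler); returned dict (assoc list) is identical.

-- ===== PORT A =====
-- grouped = defaultdict(list); for t, q, g in data: grouped[g].append((t, q));
-- then for g, items in grouped.items(): items.sort(key=fst); result[g] = [q for _, q in items]
def group_by_group_id (client_test_data : List (Int × Int × Int)) : List (Int × List Int) :=
  let grouped : PySem.Dict Int (List (Int × Int)) :=
    client_test_data.foldl
      (fun d x => d.modify x.2.2 [] (fun v => v ++ [(x.1, x.2.1)])) PySem.Dict.empty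
  let result : PySem.Dict Int (List Int) :=
    grouped.items.foldl
      (fun r a => r.insert a.1 ((PySem.List.sorted a.2 (fun p => p.1)).map (fun p => p.2)))
      PySem.Dict.empty
  result.items

-- ===== PORT B =====
-- result = {g: [] for _, _, g in data}; for _, q, g in sorted(data, key=fst): result[g].append(q)
def group_by_group_id_alt (client_test_data : List (Int × Int × Int)) : List (Int × List Int) :=
  let result : PySem.Dict Int (List Int) :=
    client_test_data.foldl (fun d x => d.insert x.2.2 []) PySem.Dict.empty
  let result2 : PySem.Dict Int (List Int) :=
    (PySem.List.sorted client_test_data (fun x => x.1)).foldl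
      (fun d x => d.modify x.2.2 [] (fun v => v ++ [x.2.1])) result
  result2.items

-- ===== PRECONDITION & SPEC =====
def Spec_group_by_group_id (client_test_data : List (Int × Int × Int)) (out : List (Int × List Int)) : Prop := out = group_by_group_id_alt client_test_data
instance (client_test_data : List (Int × Int × Int)) (out : List (Int × List Int)) : Decidable (Spec_group_by_group_id client_test_data out) := by unfold Spec_group_by_group_id; infer_instance

-- ===== CLAIM (what is proved, stated in full; the proofs are below) =====
def Claim_equal_group_by_group_id : Prop := ∀ (client_test_data : List (Int × Int × Int)), Dom_group_by_group_id client_test_data → Spec_group_by_group_id client_test_data (group_by_group_id client_test_data)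

-- ===== LEMMAS AND PROOFS =====

-- inserting before an element it compares-before just conses
theorem insertBy_eq_cons {α : Type} (b : α → α → Bool) (x : α) (zs : List α)
    (h : ∀ z ∈ zs.head?, b x z = true) :
    PySem.List.insertBy b x zs = x :: zs := by
  cases zs with
  | nil => simp [PySem.List.insertBy]
  | cons z zs => simp [PySem.List.insertBy, h z (by simp)]

-- mapping a key-preserving function through an insertion
theorem map_insertBy {α β : Type} (f : α → β) (b1 : α → α → Bool) (b2 : β → β → Bool)
    (h : ∀ a c, b2 (f a) (f c) = b1 a c) (x : α) (ys : List α) :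
    (PySem.List.insertBy b1 x ys).map f = PySem.List.insertBy b2 (f x) (ys.map f) := by
  induction ys with
  | nil => simp [PySem.List.insertBy]
  | cons y ys ih =>
      by_cases hb : b1 x y
      · simp [PySem.List.insertBy, hb, h x y]
      · simp [PySem.List.insertBy, hb, h x y, ih]

-- on a list that is already sorted by `key`, filtering commutes with insertion
theorem filter_insertBy {α : Type} (key : α → Int) (p : α → Bool) (x : α) (ys : List α)
    (hs : ys.Pairwise (fun a b => key a ≤ key b)) :
    (PySem.List.insertBy (fun a b => decide (key a < key b)) x ys).filter p =
      if p x then PySem.List.insertBy (fun a b => decide (key a < key b)) x (ys.filter p)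
      else ys.filter p := by
  induction ys with
  | nil => by_cases hp : p x <;> simp [PySem.List.insertBy, hp]
  | cons y ys ih =>
      rcases List.pairwise_cons.1 hs with ⟨hy, hs'⟩
      by_cases hxy : key x < key y
      · have hcons : PySem.List.insertBy (fun a b => decide (key a < key b)) x
            ((y :: ys).filter p) = x :: (y :: ys).filter p := by
          refine insertBy_eq_cons _ _ _ ?_
          intro z hz
          have hz' : z ∈ (y :: ys).filter p := List.mem_of_mem_head? hz
          have hzm : z ∈ y :: ys := List.mem_of_mem_filter hz'
          have : key y ≤ key z := by
            rcases List.mem_cons.1 hzm with h | h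
            · simp [h]
            · exact hy z h
          simp only [decide_eq_true_eq]; omega
        by_cases hp : p x <;>
          simp [PySem.List.insertBy, hxy, hp, hcons]
      · have ih' := ih hs'
        by_cases hp : p x <;> by_cases hpy : p y <;>
          simp [PySem.List.insertBy, hxy, hp, hpy, ih']

-- stable sort commutes with per-group filtering and pair extraction
theorem sort_filter_comm (p : (Int × Int × Int) → Bool) (l : List (Int × Int × Int)) :
    PySem.List.sorted ((l.filter p).map (fun x => (x.1, x.2.1))) (fun q => q.1)
      = ((PySem.List.sorted l (fun x => x.1)).filter p).map (fun x => (x.1, x.2.1)) := by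
  induction l using List.reverseRecOn with
  | nil => simp [PySem.List.sorted_eq_foldl_insertBy]
  | append_singleton l x ih =>
      rw [PySem.List.sorted_eq_foldl_insertBy, PySem.List.sorted_eq_foldl_insertBy] at ih ⊢
      rw [List.filter_append, List.map_append, List.foldl_append, List.foldl_append]
      simp only [List.foldl_cons, List.foldl_nil]
      have hpw : (List.foldl (fun acc x =>
          PySem.List.insertBy (fun a b => decide (a.1 < b.1)) x acc) [] l).Pairwise
            (fun a b : Int × Int × Int => a.1 ≤ b.1) := by
        have := PySem.List.sorted_pairwise l (fun x : Int × Int × Int => x.1)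
        rwa [PySem.List.sorted_eq_foldl_insertBy] at this
      rw [filter_insertBy (fun x : Int × Int × Int => x.1) p x _ hpw]
      by_cases hp : p x
      · simp only [hp, if_true, List.filter_cons, List.filter_nil, List.map_cons, List.map_nil,
          List.foldl_cons, List.foldl_nil]
        rw [ih]
        exact (map_insertBy (fun x : Int × Int × Int => (x.1, x.2.1)) _ _
          (fun a c => rfl) x _).symm
      · simp only [hp, if_false, List.filter_cons, List.filter_nil, List.map_nil,
          Bool.false_eq_true]
        exact ih

-- the value lists of B's key-priming pass are all []
theorem getD_prime_nil (l : List (Int × Int × Int)) (d : PySem.Dict Int (List Int))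
    (hd : ∀ g, d.getD g [] = []) (g : Int) :
    (l.foldl (fun d x => d.insert x.2.2 ([] : List Int)) d).getD g [] = [] := by
  induction l generalizing d with
  | nil => simpa using hd g
  | cons x l ih =>
      simp only [List.foldl_cons]
      exact ih _ (fun g' => by rw [PySem.Dict.getD_insert]; split <;> simp [hd])

-- A's result as a map over the distinct group ids
theorem portA_eq (l : List (Int × Int × Int)) :
    group_by_group_id l = (PySem.Set.ofList (l.map (fun x => x.2.2))).map
      (fun g => (g, (PySem.List.sorted
          ((l.filter (fun x => x.2.2 == g)).map (fun x => (x.1, x.2.1)))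
          (fun q => q.1)).map (fun q => q.2))) := by
  show (((l.foldl (fun d x => d.modify x.2.2 [] (fun v => v ++ [(x.1, x.2.1)]))
      PySem.Dict.empty).items).foldl
      (fun r a => r.insert a.1 ((PySem.List.sorted a.2 (fun p => p.1)).map (fun p => p.2)))
      PySem.Dict.empty).items = _
  have hkeys : (l.foldl (fun d x => d.modify x.2.2 [] (fun v => v ++ [(x.1, x.2.1)]))
      PySem.Dict.empty).keys = PySem.Set.ofList (l.map (fun x => x.2.2)) := by
    have := PySem.Dict.keys_foldl_modify_key l (fun x : Int × Int × Int => x.2.2) []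
      (fun _ x => fun v => v ++ [(x.1, x.2.1)]) PySem.Dict.empty
    simpa [PySem.Set.update_nil_left] using this
  have hnd : (l.foldl (fun d x => d.modify x.2.2 [] (fun v => v ++ [(x.1, x.2.1)]))
      PySem.Dict.empty).keys.Nodup := by
    have := PySem.Dict.nodup_keys_foldl_modify_key l (fun x : Int × Int × Int => x.2.2) []
      (fun _ x => fun v => v ++ [(x.1, x.2.1)]) PySem.Dict.empty (by simp)
    simpa using this
  have hget : ∀ g, (l.foldl (fun d x => d.modify x.2.2 [] (fun v => v ++ [(x.1, x.2.1)]))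
      PySem.Dict.empty).getD g [] =
        (l.filter (fun x => x.2.2 == g)).map (fun x => (x.1, x.2.1)) := by
    intro g
    have := PySem.Dict.getD_foldl_modify_append
      (l.map (fun x : Int × Int × Int => (x.2.2, (x.1, x.2.1)))) PySem.Dict.empty g
    rw [List.foldl_map] at this
    simpa [List.filter_map, Function.comp_def] using this
  rw [PySem.Dict.items_eq_map_keys _ hnd []]
  have hfresh : ∀ a ∈ ((l.foldl (fun d x => d.modify x.2.2 [] (fun v => v ++ [(x.1, x.2.1)]))
      PySem.Dict.empty).keys.map (fun k =>
        (k, (l.foldl (fun d x => d.modify x.2.2 [] (fun v => v ++ [(x.1, x.2.1)]))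
          PySem.Dict.empty).getD k []))),
      (PySem.Dict.empty : PySem.Dict Int (List Int)).contains a.1 = false :=
    fun a _ => PySem.Dict.contains_empty _
  have hnodup : (((l.foldl (fun d x => d.modify x.2.2 [] (fun v => v ++ [(x.1, x.2.1)]))
      PySem.Dict.empty).keys.map (fun k =>
        (k, (l.foldl (fun d x => d.modify x.2.2 [] (fun v => v ++ [(x.1, x.2.1)]))
          PySem.Dict.empty).getD k []))).map (fun a => a.1)).Nodup := by
    simpa [List.map_map, Function.comp_def] using hnd
  rw [PySem.Dict.items_foldl_insert_fresh _ (fun a => a.1)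
    (fun a => (PySem.List.sorted a.2 (fun p => p.1)).map (fun p => p.2)) PySem.Dict.empty
    hfresh hnodup]
  simp only [show (PySem.Dict.empty : PySem.Dict Int (List Int)).items = [] from rfl,
    List.nil_append, List.map_map, Function.comp_def]
  rw [hkeys]
  exact List.map_congr_left (fun g _ => by simp [hget g])

-- B's result as a map over the distinct group ids
theorem portB_eq (l : List (Int × Int × Int)) :
    group_by_group_id_alt l = (PySem.Set.ofList (l.map (fun x => x.2.2))).map
      (fun g => (g, ((PySem.List.sorted l (fun x => x.1)).filter
          (fun x => x.2.2 == g)).map (fun x => x.2.1))) := by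
  show ((PySem.List.sorted l (fun x => x.1)).foldl
      (fun d x => d.modify x.2.2 [] (fun v => v ++ [x.2.1]))
      (l.foldl (fun d x => d.insert x.2.2 []) PySem.Dict.empty)).items = _
  set d0 := l.foldl (fun d x => d.insert x.2.2 ([] : List Int)) PySem.Dict.empty with hd0
  have hk0 : d0.keys = PySem.Set.ofList (l.map (fun x => x.2.2)) := by
    have := PySem.Dict.keys_foldl_insert_key l (fun x : Int × Int × Int => x.2.2)
      (fun _ _ => ([] : List Int)) PySem.Dict.empty
    simpa [hd0, PySem.Set.update_nil_left] using this
  have hnd0 : d0.keys.Nodup := by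
    have := PySem.Dict.nodup_keys_foldl_insert_key l (fun x : Int × Int × Int => x.2.2)
      (fun _ _ => ([] : List Int)) PySem.Dict.empty (by simp)
    simpa [hd0] using this
  set s := PySem.List.sorted l (fun x : Int × Int × Int => x.1) with hs
  have hkeys : (s.foldl (fun d x => d.modify x.2.2 [] (fun v => v ++ [x.2.1])) d0).keys
      = d0.keys := by
    have := PySem.Dict.keys_foldl_modify_key s (fun x : Int × Int × Int => x.2.2) []
      (fun _ x => fun v => v ++ [x.2.1]) d0
    rw [PySem.Set.update_eq_append_filter] at this
    have hnil : (List.filter (fun y => !PySem.Set.contains d0.keys y)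
        (PySem.Set.ofList (s.map (fun x => x.2.2)))) = [] := by
      refine List.filter_eq_nil_iff.2 ?_
      intro y hy
      have hys : y ∈ s.map (fun x : Int × Int × Int => x.2.2) :=
        (PySem.Set.mem_ofList _ _).1 hy
      rcases List.mem_map.1 hys with ⟨x, hx, rfl⟩
      have hxl : x ∈ l := (PySem.List.mem_sorted l _ _ x).1 (hs ▸ hx)
      have hmem : x.2.2 ∈ d0.keys := by
        rw [hk0, PySem.Set.mem_ofList]
        exact List.mem_map.2 ⟨x, hxl, rfl⟩
      simpa using hmem
    rw [hnil, List.append_nil] at this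
    exact this
  have hnd : (s.foldl (fun d x => d.modify x.2.2 [] (fun v => v ++ [x.2.1])) d0).keys.Nodup := by
    have := PySem.Dict.nodup_keys_foldl_modify_key s (fun x : Int × Int × Int => x.2.2) []
      (fun _ x => fun v => v ++ [x.2.1]) d0 hnd0
    simpa using this
  have hget : ∀ g, (s.foldl (fun d x => d.modify x.2.2 [] (fun v => v ++ [x.2.1])) d0).getD g []
      = (s.filter (fun x => x.2.2 == g)).map (fun x => x.2.1) := by
    intro g
    have := PySem.Dict.getD_foldl_modify_append
      (s.map (fun x : Int × Int × Int => (x.2.2, x.2.1))) d0 g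
    rw [List.foldl_map] at this
    have hz : d0.getD g [] = [] := getD_prime_nil l PySem.Dict.empty (by simp) g
    simpa [List.filter_map, Function.comp_def, hz] using this
  rw [PySem.Dict.items_eq_map_keys _ hnd []]
  rw [hkeys, hk0]
  exact List.map_congr_left (fun g _ => by simp [hget g])

-- ===== VERDICT (by name: the statement is the Claim_ definition above) =====
theorem group_by_group_id_spec : Claim_equal_group_by_group_id := by
  intro l _
  show group_by_group_id l = group_by_group_id_alt l
  rw [portA_eq, portB_eq]
  refine List.map_congr_left (fun g _ => ?_)
  rw [sort_filter_comm (fun x => x.2.2 == g) l]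
  simp [List.map_map, Function.comp_def]
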